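-- pv_equiv track=rewrite | github.com/yesjiyoung/OSS_NL2SQL_Shopping_Cart_Speaker | model/sql_translation/select.py | se_find_condition
-- ===== SOURCE A (Python) =====
-- def se_find_condition (any_list):
--
--     re = 'NAN'
--
--     for i in range(0, len(any_list)):
--         if(any_list[i] == 'price' or any_list[i] == 'cheapest' or any_list[i] == 'cost'):
--             re = 'price'
--         elif(any_list[i] == 'rate'):
--             re = 'rating'
--         elif(any_list[i] == 'review'):
--             re = 'number_of_reviews'
--         elif(any_list[i] == 'brand'):
--             re = 'brand'
--         elif(any_list[i] == 'origin' or any_list[i] == 'from'):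
--             re = 'origin'
--
--     return re
-- ===== SOURCE B (Python) =====
-- _COND = {
--     'price': 'price', 'cheapest': 'price', 'cost': 'price',
--     'rate': 'rating',
--     'review': 'number_of_reviews',
--     'brand': 'brand',
--     'origin': 'origin', 'from': 'origin',
-- }
--
-- def se_find_condition(any_list):
--     for x in reversed(any_list):
--         if x in _COND:
--             return _COND[x]
--     return 'NAN'
-- ===== Notes on version B (the rewrite author's own statement) =====
-- stated objective: faster
-- what changed: Replaces the full forward accumulation loop with a keyword-to-field dict and a reverse scan that returns on the first (i.e. last forward) match.
import Mathlib
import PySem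

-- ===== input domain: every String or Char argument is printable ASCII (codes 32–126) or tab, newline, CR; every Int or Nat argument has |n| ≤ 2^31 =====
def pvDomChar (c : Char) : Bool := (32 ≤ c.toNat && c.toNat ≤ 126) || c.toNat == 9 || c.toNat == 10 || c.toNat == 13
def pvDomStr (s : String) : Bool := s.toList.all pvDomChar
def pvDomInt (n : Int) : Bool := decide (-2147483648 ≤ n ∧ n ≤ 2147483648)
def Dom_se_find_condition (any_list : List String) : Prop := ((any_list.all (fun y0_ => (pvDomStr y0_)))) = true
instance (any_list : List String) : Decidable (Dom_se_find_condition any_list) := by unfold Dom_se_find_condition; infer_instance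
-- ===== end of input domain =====

-- B replaces A's forward accumulation loop with a keyword→field dict and a reverse scan
-- returning on the first match (alternative decomposition, same cost).

-- ===== PORT A =====
-- A's forward loop: accumulator re starts at "NAN", each element may overwrite it.
def seStepA (re x : String) : String :=
  if x = "price" ∨ x = "cheapest" ∨ x = "cost" then "price"
  else if x = "rate" then "rating"
  else if x = "review" then "number_of_reviews"
  else if x = "brand" then "brand"
  else if x = "origin" ∨ x = "from" then "origin"
  else re

def se_find_condition (any_list : List String) : String :=
  any_list.foldl seStepA "NAN"

-- ===== PORT B =====
-- the module-level dict _COND of Source B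
def seCond : PySem.Dict String String :=
  PySem.Dict.ofList [("price", "price"), ("cheapest", "price"), ("cost", "price"),
    ("rate", "rating"), ("review", "number_of_reviews"), ("brand", "brand"),
    ("origin", "origin"), ("from", "origin")]

-- Source B's reverse scan with early return
def seRevFind : List String → String
  | [] => "NAN"
  | x :: rest =>
    match seCond.get? x with
    | some f => f
    | none => seRevFind rest

def se_find_condition_alt (any_list : List String) : String :=
  seRevFind any_list.reverse

-- ===== PRECONDITION & SPEC =====
def Spec_se_find_condition (any_list : List String) (out : String) : Prop := out = se_find_condition_alt any_list
instance (any_list : List String) (out : String) : Decidable (Spec_se_find_condition any_list out) := by unfold Spec_se_find_condition; infer_instance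

-- ===== CLAIM (what is proved, stated in full; the proofs are below) =====
def Claim_equal_se_find_condition : Prop := ∀ (any_list : List String), Dom_se_find_condition any_list → Spec_se_find_condition any_list (se_find_condition any_list)

-- ===== LEMMAS AND PROOFS =====

-- seCond's item list, computed once
theorem seCond_items : seCond.items = [("price", "price"), ("cheapest", "price"),
    ("cost", "price"), ("rate", "rating"), ("review", "number_of_reviews"),
    ("brand", "brand"), ("origin", "origin"), ("from", "origin")] := rfl

-- lookup misses when x is none of the keywords
theorem seCond_get_none {x : String} (h1 : ¬ x = "price") (h2 : ¬ x = "cheapest")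
    (h3 : ¬ x = "cost") (h4 : ¬ x = "rate") (h5 : ¬ x = "review") (h6 : ¬ x = "brand")
    (h7 : ¬ x = "origin") (h8 : ¬ x = "from") : seCond.get? x = none := by
  simp [PySem.Dict.get?, seCond_items, List.find?,
    beq_eq_false_iff_ne.mpr (Ne.symm h1), beq_eq_false_iff_ne.mpr (Ne.symm h2),
    beq_eq_false_iff_ne.mpr (Ne.symm h3), beq_eq_false_iff_ne.mpr (Ne.symm h4),
    beq_eq_false_iff_ne.mpr (Ne.symm h5), beq_eq_false_iff_ne.mpr (Ne.symm h6),
    beq_eq_false_iff_ne.mpr (Ne.symm h7), beq_eq_false_iff_ne.mpr (Ne.symm h8)]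

-- A's step equals a dict lookup with the accumulator as default
theorem seStepA_eq_lookup (re x : String) :
    seStepA re x = (seCond.get? x).getD re := by
  by_cases h1 : x = "price"; · subst h1; rfl
  by_cases h2 : x = "cheapest"; · subst h2; rfl
  by_cases h3 : x = "cost"; · subst h3; rfl
  by_cases h4 : x = "rate"; · subst h4; rfl
  by_cases h5 : x = "review"; · subst h5; rfl
  by_cases h6 : x = "brand"; · subst h6; rfl
  by_cases h7 : x = "origin"; · subst h7; rfl
  by_cases h8 : x = "from"; · subst h8; rfl
  rw [seCond_get_none h1 h2 h3 h4 h5 h6 h7 h8]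
  simp [seStepA, h1, h2, h3, h4, h5, h6, h7, h8]

-- main invariant: A's forward fold from acc equals the first dict hit scanning reversed input,
-- with acc when nothing matches
theorem seFold_inv (l : List String) (acc : String) :
    l.foldl seStepA acc =
      (match (l.reverse.findSome? (fun x => seCond.get? x)) with
       | some f => f
       | none => acc) := by
  induction l generalizing acc with
  | nil => simp
  | cons y ys ih =>
    simp only [List.foldl_cons, ih, List.reverse_cons]
    rw [List.findSome?_append]
    cases h : ys.reverse.findSome? (fun x => seCond.get? x) with
    | some f => simp
    | none =>
      simp only [Option.none_or]
      rw [seStepA_eq_lookup]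
      simp [List.findSome?]
      cases seCond.get? y <;> rfl

-- B's reverse scan is that same first dict hit
theorem seRevFind_eq_findSome (l : List String) :
    seRevFind l = match l.findSome? (fun x => seCond.get? x) with
      | some f => f
      | none => "NAN" := by
  induction l with
  | nil => rfl
  | cons y ys ih =>
    simp only [seRevFind, ih, List.findSome?]
    cases seCond.get? y <;> rfl

-- ===== VERDICT (by name: the statement is the Claim_ definition above) =====
theorem se_find_condition_spec : Claim_equal_se_find_condition := by
  intro l _
  unfold Spec_se_find_condition se_find_condition se_find_condition_alt
  rw [seFold_inv, seRevFind_eq_findSome]
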